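-- pv_equiv track=rewrite | github.com/ruoxuanbai1/embodied-rta | case3_online_eval.py | apply_alarm_persistence
-- ===== SOURCE A (Python) =====
-- def apply_alarm_persistence(alarm_seq: list[bool], min_consecutive: int = 1) -> list[bool]:
--     if min_consecutive <= 1 or not alarm_seq:
--         return list(alarm_seq)
--
--     persisted = [False] * len(alarm_seq)
--     run_start: int | None = None
--     for idx, alarm in enumerate(alarm_seq):
--         if alarm and run_start is None:
--             run_start = idx
--         elif (not alarm) and run_start is not None:
--             run_len = idx - run_start
--             if run_len >= min_consecutive:
--                 onset = run_start + min_consecutive - 1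
--                 for pos in range(onset, idx):
--                     persisted[pos] = True
--             run_start = None
--     if run_start is not None:
--         run_len = len(alarm_seq) - run_start
--         if run_len >= min_consecutive:
--             onset = run_start + min_consecutive - 1
--             for pos in range(onset, len(alarm_seq)):
--                 persisted[pos] = True
--     return persisted
-- ===== SOURCE B (Python) =====
-- def apply_alarm_persistence(alarm_seq: list[bool], min_consecutive: int = 1) -> list[bool]:
--     if min_consecutive <= 1 or not alarm_seq:
--         return list(alarm_seq)
--     persisted = []
--     count = 0
--     for alarm in alarm_seq:
--         count = count + 1 if alarm else 0
--         persisted.append(count >= min_consecutive)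
--     return persisted
-- ===== Notes on version B (the rewrite author's own statement) =====
-- stated objective: simpler
-- what changed: Replaces run-start tracking with interval back-fill loops by a single forward pass keeping a running count of consecutive alarms and emitting count >= min_consecutive per element.
import Mathlib
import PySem

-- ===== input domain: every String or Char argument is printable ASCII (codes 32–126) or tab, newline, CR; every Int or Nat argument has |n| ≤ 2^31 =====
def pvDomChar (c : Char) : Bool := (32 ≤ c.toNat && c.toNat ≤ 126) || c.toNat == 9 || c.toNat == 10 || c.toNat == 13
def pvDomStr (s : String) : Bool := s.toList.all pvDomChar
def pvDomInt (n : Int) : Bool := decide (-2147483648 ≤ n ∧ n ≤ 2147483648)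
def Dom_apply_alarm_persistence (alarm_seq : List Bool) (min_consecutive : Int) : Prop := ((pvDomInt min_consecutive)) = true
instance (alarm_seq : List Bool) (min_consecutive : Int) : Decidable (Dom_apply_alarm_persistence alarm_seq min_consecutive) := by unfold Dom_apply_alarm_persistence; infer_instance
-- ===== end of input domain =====

-- B replaces A's run-start tracking and interval back-fill loops by a single pass with a
-- running count of consecutive alarms (objective: simpler; same O(n) cost).

-- ===== PORT A =====
-- persisted[pos] = True; pos is always a nonnegative in-range index here, so .set pos.toNat is exact
def pvMark (p : List Bool) (pos : Int) : List Bool := p.set pos.toNat true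

-- the enumerate loop; Python's 'if alarm and run_start is None / elif (not alarm) and
-- run_start is not None' is expanded over the two cases of run_start (same tests, same order)
def pvLoopA (m : Int) : List Bool → Int → List Bool → Option Int → List Bool × Option Int
  | [], _idx, p, r => (p, r)
  | a :: rest, idx, p, r =>
    match r with
    | none =>
      if a then pvLoopA m rest (idx + 1) p (some idx)
      else pvLoopA m rest (idx + 1) p none
    | some s =>
      if a then pvLoopA m rest (idx + 1) p (some s)
      else
        let p' := if m ≤ idx - s then
            (PySem.List.pyRange (s + m - 1) idx 1).foldl (fun q pos => pvMark q pos) p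
          else p
        pvLoopA m rest (idx + 1) p' none

-- the trailing 'if run_start is not None' flush after the loop
def pvFlush (m : Int) (n : Int) : List Bool × Option Int → List Bool
  | (p, none) => p
  | (p, some s) =>
    if m ≤ n - s then (PySem.List.pyRange (s + m - 1) n 1).foldl (fun q pos => pvMark q pos) p
    else p

def apply_alarm_persistence (alarm_seq : List Bool) (min_consecutive : Int) : List Bool :=
  if min_consecutive ≤ 1 ∨ alarm_seq = [] then alarm_seq
  else
    pvFlush min_consecutive (alarm_seq.length : Int)
      (pvLoopA min_consecutive alarm_seq 0 (List.replicate alarm_seq.length false) none)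

-- ===== PORT B =====
def pvAltGo (m : Int) (c : Int) : List Bool → List Bool
  | [] => []
  | a :: rest =>
    let c' := if a then c + 1 else 0
    decide (m ≤ c') :: pvAltGo m c' rest

def apply_alarm_persistence_alt (alarm_seq : List Bool) (min_consecutive : Int) : List Bool :=
  if min_consecutive ≤ 1 ∨ alarm_seq = [] then alarm_seq
  else pvAltGo min_consecutive 0 alarm_seq

-- ===== PRECONDITION & SPEC =====
def Spec_apply_alarm_persistence (alarm_seq : List Bool) (min_consecutive : Int) (out : List Bool) : Prop := out = apply_alarm_persistence_alt alarm_seq min_consecutive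
instance (alarm_seq : List Bool) (min_consecutive : Int) (out : List Bool) : Decidable (Spec_apply_alarm_persistence alarm_seq min_consecutive out) := by unfold Spec_apply_alarm_persistence; infer_instance

-- ===== CLAIM (what is proved, stated in full; the proofs are below) =====
def Claim_equal_apply_alarm_persistence : Prop := ∀ (alarm_seq : List Bool) (min_consecutive : Int), Dom_apply_alarm_persistence alarm_seq min_consecutive → Spec_apply_alarm_persistence alarm_seq min_consecutive (apply_alarm_persistence alarm_seq min_consecutive)

-- ===== LEMMAS AND PROOFS =====

-- B's marks for a finished (or pending) run of length c: offset j is marked iff m ≤ j+1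
def pvMarks (m : Int) (c : Nat) : List Bool :=
  (List.range c).map (fun (j : Nat) => decide (m ≤ (j : Int) + 1))

lemma length_pvMarks (m : Int) (c : Nat) : (pvMarks m c).length = c := by
  simp [pvMarks]

lemma getElem?_pvMarks (m : Int) (c : Nat) (i : Nat) (hi : i < c) :
    (pvMarks m c)[i]? = some (decide (m ≤ (i : Int) + 1)) := by
  simp only [pvMarks]
  rw [List.getElem?_eq_getElem (by simpa using hi), List.getElem_map, List.getElem_range]

lemma pvMarks_succ (m : Int) (c : Nat) :
    pvMarks m (c + 1) = pvMarks m c ++ [decide (m ≤ (c : Int) + 1)] := by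
  simp [pvMarks, List.range_succ]

lemma pvMarks_eq_replicate (m : Int) (c : Nat) (h : (c : Int) < m) :
    pvMarks m c = List.replicate c false := by
  apply List.ext_getElem?
  intro i
  rcases lt_or_ge i c with hi | hi
  · rw [List.getElem?_replicate, if_pos hi, getElem?_pvMarks m c i hi]
    simp only [Option.some.injEq, decide_eq_false_iff_not]
    omega
  · rw [List.getElem?_eq_none (by rw [length_pvMarks]; omega),
      List.getElem?_eq_none (by rw [List.length_replicate]; omega)]

lemma fold_mark_length (xs : List Int) (l : List Bool) :
    (xs.foldl (fun q pos => pvMark q pos) l).length = l.length := by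
  induction xs generalizing l with
  | nil => rfl
  | cons x xs ih => rw [List.foldl_cons, ih]; simp [pvMark]

lemma fold_mark_get? (l : List Bool) (a : Int) (h0 : 0 ≤ a) (k : Nat) (i : Nat) :
    ((PySem.List.pyRange a (a + k) 1).foldl (fun q pos => pvMark q pos) l)[i]?
    = if a ≤ (i : Int) ∧ (i : Int) < a + k ∧ i < l.length then some true else l[i]? := by
  induction k with
  | zero =>
    rw [show (a + ((0 : Nat) : Int)) = a by push_cast; ring,
      PySem.List.pyRange_one_eq_nil (le_refl a)]
    simp only [List.foldl_nil]
    rw [if_neg (by omega)]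
  | succ k ih =>
    rw [show (a + ((k + 1 : Nat) : Int)) = (a + k) + 1 by push_cast; ring,
      PySem.List.pyRange_one_succ_right (by omega), List.foldl_append]
    simp only [List.foldl_cons, List.foldl_nil]
    rw [pvMark, List.getElem?_set, fold_mark_length, ih]
    split_ifs <;>
      first
        | rfl
        | (symm; exact List.getElem?_eq_none (by omega))
        | (exact List.getElem?_eq_none (by omega))
        | (exfalso; omega)

lemma fold_mark_get?' (l : List Bool) (a b : Int) (h0 : 0 ≤ a) (i : Nat) :
    ((PySem.List.pyRange a b 1).foldl (fun q pos => pvMark q pos) l)[i]?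
    = if a ≤ (i : Int) ∧ (i : Int) < b ∧ i < l.length then some true else l[i]? := by
  rcases le_or_gt b a with h | h
  · rw [PySem.List.pyRange_one_eq_nil h]
    simp only [List.foldl_nil]
    rw [if_neg (by omega)]
  · have hb : b = a + ((b - a).toNat : Int) := by omega
    rw [hb]
    exact fold_mark_get? l a h0 (b - a).toNat i

lemma mark_fold (m : Int) (hm : 2 ≤ m) (pre t : List Bool) (c : Nat) :
    ((PySem.List.pyRange ((pre.length : Int) + m - 1) ((pre.length : Int) + (c : Int)) 1).foldl
        (fun q pos => pvMark q pos) (pre ++ (List.replicate c false ++ t)))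
    = pre ++ (pvMarks m c ++ t) := by
  apply List.ext_getElem?
  intro i
  rw [fold_mark_get?' _ _ _ (by omega)]
  simp only [List.length_append, List.length_replicate]
  rcases lt_or_ge i pre.length with h1 | h1
  · rw [if_neg (by omega),
      List.getElem?_append (l₁ := pre) (l₂ := List.replicate c false ++ t), if_pos h1,
      List.getElem?_append (l₁ := pre) (l₂ := pvMarks m c ++ t), if_pos h1]
  · rcases lt_or_ge i (pre.length + c) with h2 | h2
    · have hj : i - pre.length < c := by omega
      by_cases hcond : (pre.length : Int) + m - 1 ≤ (i : Int)
      · rw [if_pos ⟨hcond, by omega, by omega⟩,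
          List.getElem?_append (l₁ := pre) (l₂ := pvMarks m c ++ t), if_neg (by omega),
          List.getElem?_append (l₁ := pvMarks m c),
          if_pos (show i - pre.length < (pvMarks m c).length by rw [length_pvMarks]; omega),
          getElem?_pvMarks m c _ hj]
        simp only [Option.some.injEq]
        symm
        rw [decide_eq_true_iff]
        omega
      · rw [if_neg (by omega),
          List.getElem?_append (l₁ := pre) (l₂ := List.replicate c false ++ t),
          if_neg (by omega),
          List.getElem?_append (l₁ := List.replicate c false),
          if_pos (show i - pre.length < (List.replicate c false).length by
            rw [List.length_replicate]; omega),
          List.getElem?_replicate, if_pos hj,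
          List.getElem?_append (l₁ := pre) (l₂ := pvMarks m c ++ t), if_neg (by omega),
          List.getElem?_append (l₁ := pvMarks m c),
          if_pos (show i - pre.length < (pvMarks m c).length by rw [length_pvMarks]; omega),
          getElem?_pvMarks m c _ hj]
        simp only [Option.some.injEq]
        symm
        rw [decide_eq_false_iff_not]
        omega
    · rw [if_neg (by omega),
        List.getElem?_append (l₁ := pre) (l₂ := List.replicate c false ++ t), if_neg (by omega),
        List.getElem?_append (l₁ := List.replicate c false),
        if_neg (show ¬ (i - pre.length < (List.replicate c false).length) by
          rw [List.length_replicate]; omega),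
        List.getElem?_append (l₁ := pre) (l₂ := pvMarks m c ++ t), if_neg (by omega),
        List.getElem?_append (l₁ := pvMarks m c),
        if_neg (show ¬ (i - pre.length < (pvMarks m c).length) by rw [length_pvMarks]; omega)]
      simp [length_pvMarks]

lemma loop_inv (m : Int) (hm : 2 ≤ m) :
    ∀ (rest pre : List Bool) (c : Nat),
      pvFlush m (((pre.length + c + rest.length : Nat) : Int))
        (pvLoopA m rest ((pre.length : Int) + (c : Int))
          (pre ++ List.replicate (c + rest.length) false)
          (if c = 0 then none else some (pre.length : Int)))
      = pre ++ (pvMarks m c ++ pvAltGo m c rest) := by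
  intro rest
  induction rest with
  | nil =>
    intro pre c
    simp only [pvLoopA, List.length_nil, Nat.add_zero, pvAltGo]
    rcases Nat.eq_zero_or_pos c with hc | hc
    · subst hc
      simp [pvFlush, pvMarks]
    · rw [if_neg (by omega)]
      simp only [pvFlush]
      by_cases hmc : m ≤ ((pre.length + c : Nat) : Int) - (pre.length : Int)
      · rw [if_pos hmc]
        rw [show (((pre.length + c : Nat) : Int)) = (pre.length : Int) + (c : Int) by push_cast; ring]
        simpa using mark_fold m hm pre [] c
      · rw [if_neg hmc]
        rw [pvMarks_eq_replicate m c (by push_cast at hmc ⊢; omega)]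
        simp
  | cons a rest' ih =>
    intro pre c
    rcases Nat.eq_zero_or_pos c with hc | hc
    · subst hc
      cases a with
      | true =>
        simp only [pvLoopA, List.length_cons, reduceIte, Nat.zero_add, Nat.cast_zero, add_zero]
        have h := ih pre 1
        rw [if_neg (by omega)] at h
        rw [show (pre ++ List.replicate (rest'.length + 1) false)
              = (pre ++ List.replicate (1 + rest'.length) false) from by rw [Nat.add_comm],
          show ((pre.length + (rest'.length + 1) : Nat) : Int)
              = ((pre.length + 1 + rest'.length : Nat) : Int) from by push_cast; ring]
        rw [show (((1 : Nat) : Int)) = 1 from by norm_num] at h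
        rw [h]
        simp [pvMarks, pvAltGo]
      | false =>
        simp only [pvLoopA, List.length_cons, Bool.false_eq_true, reduceIte, Nat.zero_add,
          Nat.cast_zero, add_zero]
        have h := ih (pre ++ [false]) 0
        rw [if_pos rfl] at h
        simp only [List.length_append, List.length_cons, List.length_nil, Nat.zero_add] at h
        rw [show (pre ++ List.replicate (rest'.length + 1) false)
              = (pre ++ [false] ++ List.replicate rest'.length false) from by
            simp [List.replicate_succ, List.append_assoc],
          show ((pre.length + (rest'.length + 1) : Nat) : Int)
              = ((pre.length + 1 + 0 + rest'.length : Nat) : Int) from by push_cast; ring,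
          show ((pre.length : Int) + 1) = (((pre.length + 1 : Nat) : Int) + (((0 : Nat)) : Int)) from by
            push_cast; ring]
        rw [h]
        simp only [pvMarks, pvAltGo]
        simp [List.append_assoc]
        omega
    · rw [if_neg (by omega)]
      cases a with
      | true =>
        simp only [pvLoopA, List.length_cons, reduceIte]
        have h := ih pre (c + 1)
        rw [if_neg (by omega)] at h
        rw [show (c + (rest'.length + 1)) = c + 1 + rest'.length from by ring,
          show ((pre.length + c + (rest'.length + 1) : Nat) : Int)
              = ((pre.length + (c + 1) + rest'.length : Nat) : Int) from by push_cast; ring,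
          show ((pre.length : Int) + (c : Int) + 1) = ((pre.length : Int) + ((c + 1 : Nat) : Int)) from by
            push_cast; ring]
        rw [h, pvMarks_succ]
        simp [pvAltGo, List.append_assoc]
      | false =>
        simp only [pvLoopA, List.length_cons, Bool.false_eq_true, reduceIte]
        rw [show ((pre.length : Int) + (c : Int) - (pre.length : Int)) = (c : Int) from by ring]
        by_cases hmc : m ≤ (c : Int)
        · rw [if_pos hmc,
            show (c + (rest'.length + 1)) = c + (1 + rest'.length) from by ring,
            List.replicate_add,
            mark_fold m hm pre (List.replicate (1 + rest'.length) false) c]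
          have h := ih (pre ++ (pvMarks m c ++ [false])) 0
          rw [if_pos rfl] at h
          simp only [List.length_append, List.length_cons, List.length_nil, length_pvMarks,
            Nat.zero_add] at h
          rw [show (pre ++ (pvMarks m c ++ List.replicate (1 + rest'.length) false))
                = (pre ++ (pvMarks m c ++ [false]) ++ List.replicate rest'.length false) from by
              simp [show (1 + rest'.length) = rest'.length + 1 from by ring, List.replicate_succ,
                List.append_assoc],
            show ((pre.length + c + (rest'.length + 1) : Nat) : Int)
                = ((pre.length + (c + 1) + 0 + rest'.length : Nat) : Int) from by push_cast; ring,
            show ((pre.length : Int) + (c : Int) + 1)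
                = (((pre.length + (c + 1) : Nat) : Int) + (((0 : Nat)) : Int)) from by push_cast; ring]
          rw [h]
          simp [pvMarks, pvAltGo, List.append_assoc]
          omega
        · rw [if_neg hmc, pvMarks_eq_replicate m c (by omega)]
          have h := ih (pre ++ (List.replicate c false ++ [false])) 0
          rw [if_pos rfl] at h
          simp only [List.length_append, List.length_cons, List.length_nil, List.length_replicate,
            Nat.zero_add] at h
          rw [show (pre ++ List.replicate (c + (rest'.length + 1)) false)
                = (pre ++ (List.replicate c false ++ [false]) ++ List.replicate rest'.length false) from by
              simp only [← List.replicate_succ', ← List.replicate_add, List.append_assoc]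
              rw [show c + 1 + rest'.length = c + (rest'.length + 1) from by ring],
            show ((pre.length + c + (rest'.length + 1) : Nat) : Int)
                = ((pre.length + (c + 1) + 0 + rest'.length : Nat) : Int) from by push_cast; ring,
            show ((pre.length : Int) + (c : Int) + 1)
                = (((pre.length + (c + 1) : Nat) : Int) + (((0 : Nat)) : Int)) from by push_cast; ring]
          rw [h]
          simp [pvMarks, pvAltGo, List.append_assoc]
          omega

-- ===== VERDICT (by name: the statement is the Claim_ definition above) =====
theorem apply_alarm_persistence_spec : Claim_equal_apply_alarm_persistence := by
  intro seq m _
  unfold Spec_apply_alarm_persistence apply_alarm_persistence apply_alarm_persistence_alt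
  by_cases hg : m ≤ 1 ∨ seq = []
  · rw [if_pos hg, if_pos hg]
  · rw [if_neg hg, if_neg hg]
    rw [not_or] at hg
    obtain ⟨hg1, _⟩ := hg
    have hm : 2 ≤ m := by omega
    have h := loop_inv m hm seq [] 0
    simpa [pvMarks] using h
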